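-- pv_equiv track=rewrite | github.com/AI-paltan/main_page_processing | note_utils.py | get_first_note_occurance
-- ===== SOURCE A (Python) =====
-- def get_first_note_occurance(notes_pages,notes_bbox):
--     final_page = []
--     final_bbox = []
--     tmp_pge = notes_pages[0]
--     tmpbbox = notes_bbox[0]
--     for pge,bbox in zip(notes_pages,notes_bbox):
--         if pge < tmp_pge:
--             tmp_pge = pge
--             tmpbbox = bbox
--         elif pge == tmp_pge and (bbox[1]<tmpbbox[1]):
--             tmpbbox = bbox
--     final_page.append(tmp_pge)
--     final_bbox.append(tmpbbox)
--     return final_page,final_bbox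
-- ===== SOURCE B (Python) =====
-- def get_first_note_occurance(notes_pages, notes_bbox):
--     pairs = list(zip(notes_pages, notes_bbox))
--     min_page = min(p for p, _ in pairs)
--     best = None
--     for p, b in pairs:
--         if p == min_page and (best is None or b[1] < best[1]):
--             best = b
--     return [min_page], [best]
-- ===== Notes on version B (the rewrite author's own statement) =====
-- stated objective: alternative
-- what changed: A keeps a combined running (min page, best bbox) state in a single scan; B first computes the minimal page with min(), then a second filtered pass keeps the first bbox with minimal bbox[1] among entries on that page.
-- outside the precondition, e.g. on get_first_note_occurance([1, 2], [[0, 0], [5]]): A returns ([1], [[0, 0]]), B returns ([1], [[0, 0]])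
import Mathlib
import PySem

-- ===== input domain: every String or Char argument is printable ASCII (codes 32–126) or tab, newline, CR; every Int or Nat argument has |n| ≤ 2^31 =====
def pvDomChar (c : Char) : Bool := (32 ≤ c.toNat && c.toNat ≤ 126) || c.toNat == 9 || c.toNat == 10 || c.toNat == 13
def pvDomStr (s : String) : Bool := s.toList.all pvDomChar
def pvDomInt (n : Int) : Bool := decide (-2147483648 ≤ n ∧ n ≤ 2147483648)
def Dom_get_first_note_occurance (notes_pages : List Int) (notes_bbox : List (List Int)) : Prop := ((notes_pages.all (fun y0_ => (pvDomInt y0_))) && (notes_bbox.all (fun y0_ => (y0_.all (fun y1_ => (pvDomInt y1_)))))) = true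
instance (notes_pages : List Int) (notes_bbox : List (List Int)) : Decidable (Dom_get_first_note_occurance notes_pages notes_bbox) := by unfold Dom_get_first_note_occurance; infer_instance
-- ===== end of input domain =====

-- B splits A's combined running-min scan into a min()-of-pages pass plus a filtered
-- topmost-bbox pass (objective: alternative decomposition, same cost).

-- bbox[1] as Python reads it (the 0 default is only reachable outside Pre_)
def pvBB1 (b : List Int) : Int := (PySem.List.pyGet? b 1).getD 0

-- ===== PORT A =====
-- A's loop body, named (the for-loop becomes a foldl over the same (tmp_pge, tmpbbox) state)
def pvStepA (st : Int × List Int) (pb : Int × List Int) : Int × List Int :=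
  if pb.1 < st.1 then (pb.1, pb.2)
  else if pb.1 == st.1 && decide (pvBB1 pb.2 < pvBB1 st.2) then (st.1, pb.2)
  else st

def get_first_note_occurance (notes_pages : List Int) (notes_bbox : List (List Int)) : List Int × List (List Int) :=
  let tmp_pge := (PySem.List.pyGet? notes_pages 0).getD 0
  let tmpbbox := (PySem.List.pyGet? notes_bbox 0).getD []
  let st := (List.zip notes_pages notes_bbox).foldl pvStepA (tmp_pge, tmpbbox)
  ([st.1], [st.2])

-- ===== PORT B =====
-- B's loop body, named (the filtered second pass over the pairs, given the min page)
def pvStepB (m : Int) (best : Option (List Int)) (pb : Int × List Int) : Option (List Int) :=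
  if pb.1 == m && (best.isNone || decide (pvBB1 pb.2 < pvBB1 (best.getD []))) then some pb.2
  else best

def get_first_note_occurance_alt (notes_pages : List Int) (notes_bbox : List (List Int)) : List Int × List (List Int) :=
  let pairs := List.zip notes_pages notes_bbox
  let min_page := (PySem.List.min? (pairs.map Prod.fst) (fun y => y)).getD 0
  let best := pairs.foldl (pvStepB min_page) (none : Option (List Int))
  ([min_page], [best.getD []])

-- ===== PRECONDITION & SPEC =====
-- Pre_ excludes empty inputs (A raises IndexError) and any input where a bbox inside
-- the zipped range has fewer than 2 entries: on some of those A raises IndexError, and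
-- on others (a short bbox whose page never equals the running minimum) A returns
-- normally with the same value B returns — see the cite in the claim.
def Pre_get_first_note_occurance (notes_pages : List Int) (notes_bbox : List (List Int)) : Prop :=
  notes_pages ≠ [] ∧ notes_bbox ≠ [] ∧ ∀ b ∈ notes_bbox.take notes_pages.length, 2 ≤ b.length
instance (notes_pages : List Int) (notes_bbox : List (List Int)) : Decidable (Pre_get_first_note_occurance notes_pages notes_bbox) := by unfold Pre_get_first_note_occurance; infer_instance
def pvWitness_get_first_note_occurance : List Int × List (List Int) := ([2, 1, 1], [[0, 5], [1, 4], [2, 3]])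

def Spec_get_first_note_occurance (notes_pages : List Int) (notes_bbox : List (List Int)) (out : List Int × List (List Int)) : Prop := out = get_first_note_occurance_alt notes_pages notes_bbox
instance (notes_pages : List Int) (notes_bbox : List (List Int)) (out : List Int × List (List Int)) : Decidable (Spec_get_first_note_occurance notes_pages notes_bbox out) := by unfold Spec_get_first_note_occurance; infer_instance

-- ===== CLAIM (what is proved, stated in full; the proofs are below) =====
def Claim_equal_get_first_note_occurance : Prop := ∀ (notes_pages : List Int) (notes_bbox : List (List Int)), Dom_get_first_note_occurance notes_pages notes_bbox → Pre_get_first_note_occurance notes_pages notes_bbox → Spec_get_first_note_occurance notes_pages notes_bbox (get_first_note_occurance notes_pages notes_bbox)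

-- ===== LEMMAS AND PROOFS =====

theorem pvStepB_ne (m : Int) (best : Option (List Int)) (pb : Int × List Int)
    (h : pb.1 ≠ m) : pvStepB m best pb = best := by
  simp [pvStepB, h]

-- if some element of l has page m (or the accumulator is already some), the B-fold ends in `some`
theorem pvSel_isSome (m : Int) (l : List (Int × List Int)) :
    ∀ (init : Option (List Int)), (init.isSome ∨ ∃ x ∈ l, x.1 = m) →
      (l.foldl (pvStepB m) init).isSome := by
  induction l with
  | nil =>
    intro init h
    simp only [List.foldl_nil]
    rcases h with h | ⟨x, hx, _⟩
    · exact h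
    · exact absurd hx List.not_mem_nil
  | cons a t ih =>
    intro init h
    simp only [List.foldl_cons]
    apply ih
    rcases h with h | ⟨x, hx, hxm⟩
    · left
      unfold pvStepB
      split
      · simp
      · exact h
    · rcases List.mem_cons.mp hx with rfl | hxt
      · left
        unfold pvStepB
        split
        · simp
        · rename_i hcond
          cases init with
          | some b => simp
          | none => simp [hxm] at hcond
      · exact Or.inr ⟨x, hxt, hxm⟩

-- getD with different defaults agrees on `some`
theorem pvGetD_of_isSome {α : Type} (o : Option α) (h : o.isSome) (d₁ d₂ : α) :
    o.getD d₁ = o.getD d₂ := by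
  cases o with
  | none => simp at h
  | some a => rfl

theorem pvFoldMin_le (t : List Int) (a : Int) : t.foldl min a ≤ a :=
  (PySem.List.foldl_min_le t a).1

theorem pvFoldMin_attained (t : List Int) (a : Int) :
    t.foldl min a = a ∨ t.foldl min a ∈ t := PySem.List.foldl_min_mem t a

-- the running min of the pair list's pages is attained by some pair (or the seed)
theorem pvMin_pair_attained (l : List (Int × List Int)) (a : Int) (c : List Int) :
    ∃ x ∈ (a, c) :: l, x.1 = (l.map Prod.fst).foldl min a := by
  rcases pvFoldMin_attained (l.map Prod.fst) a with h | h
  · exact ⟨(a, c), List.mem_cons_self, h.symm⟩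
  · rcases List.mem_map.mp h with ⟨x, hx, hxm⟩
    exact ⟨x, List.mem_cons_of_mem _ hx, by rw [hxm]⟩

-- MAIN INVARIANT: A's fold from state (p0,b0) over l equals (min of pages, B's
-- selection over (p0,b0)::l at that min), the selection defaulting to b0.
theorem pvMain (l : List (Int × List Int)) :
    ∀ (p0 : Int) (b0 : List Int),
      l.foldl pvStepA (p0, b0) =
        ((l.map Prod.fst).foldl min p0,
         (((p0, b0) :: l).foldl (pvStepB ((l.map Prod.fst).foldl min p0)) none).getD b0) := by
  induction l with
  | nil =>
    intro p0 b0
    simp [pvStepB]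
  | cons a t ih =>
    intro p0 b0
    obtain ⟨p, b⟩ := a
    simp only [List.foldl_cons, List.map_cons]
    by_cases h1 : p < p0
    · -- new smaller page: A resets state to (p, b)
      have hstep : pvStepA (p0, b0) (p, b) = (p, b) := by simp [pvStepA, h1]
      rw [hstep, ih p b]
      have hmin : min p0 p = p := min_eq_right (le_of_lt h1)
      rw [hmin]
      set M := (t.map Prod.fst).foldl min p with hM
      have hMle : M ≤ p := pvFoldMin_le _ _
      have hne : p0 ≠ M := by omega
      refine Prod.ext_iff.mpr ⟨rfl, ?_⟩
      simp only
      rw [pvStepB_ne M none (p0, b0) hne]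
      have hsome : (((p, b) :: t).foldl (pvStepB M) none).isSome :=
        pvSel_isSome M _ none (Or.inr (pvMin_pair_attained t p b))
      simp only [List.foldl_cons] at hsome ⊢
      exact pvGetD_of_isSome _ hsome b b0
    · have hmin : min p0 p = p0 := min_eq_left (by omega)
      by_cases h2 : p = p0 ∧ pvBB1 b < pvBB1 b0
      · -- replacement on equal page
        have hstep : pvStepA (p0, b0) (p, b) = (p0, b) := by
          simp [pvStepA, h2.1, h2.2]
        rw [hstep, ih p0 b, hmin]
        generalize hMdef : (t.map Prod.fst).foldl min p0 = M
        refine Prod.ext_iff.mpr ⟨rfl, ?_⟩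
        simp only [List.foldl_cons]
        have hkey : pvStepB M (pvStepB M none (p0, b0)) (p, b) = pvStepB M none (p0, b) := by
          by_cases hp0 : p0 = M
          · subst hp0
            simp [pvStepB, h2.1, h2.2]
          · rw [pvStepB_ne M none (p0, b0) hp0, pvStepB_ne M none (p0, b) hp0,
              pvStepB_ne M none (p, b) (h2.1 ▸ hp0)]
        rw [hkey]
        have hsome : (((p0, b) :: t).foldl (pvStepB M) none).isSome :=
          pvSel_isSome M _ none (Or.inr (hMdef ▸ pvMin_pair_attained t p0 b))
        simp only [List.foldl_cons] at hsome
        exact pvGetD_of_isSome _ hsome b b0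
      · -- no change in A's state
        have hstep : pvStepA (p0, b0) (p, b) = (p0, b0) := by
          unfold pvStepA
          by_cases hpe : p = p0
          · have hnl : ¬ pvBB1 b < pvBB1 b0 := fun hc => h2 ⟨hpe, hc⟩
            simp [hpe, hnl]
          · simp [h1, hpe]
        rw [hstep, ih p0 b0, hmin]
        generalize hMdef : (t.map Prod.fst).foldl min p0 = M
        have hMle : M ≤ p0 := hMdef ▸ pvFoldMin_le (t.map Prod.fst) p0
        refine Prod.ext_iff.mpr ⟨rfl, ?_⟩
        simp only [List.foldl_cons]
        have hkey : pvStepB M (pvStepB M none (p0, b0)) (p, b) = pvStepB M none (p0, b0) := by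
          by_cases hp : p = M
          · have hp0 : p0 = M := by omega
            have hpe : p = p0 := by omega
            have hnl : ¬ pvBB1 b < pvBB1 b0 := fun hc => h2 ⟨hpe, hc⟩
            subst hp0
            simp [pvStepB, hp, hnl]
          · exact pvStepB_ne M _ (p, b) hp
        rw [hkey]

-- the first iteration of A's loop is the identity (pge == tmp_pge, same bbox)
theorem pvFirstStep (a : Int) (c : List Int) : pvStepA (a, c) (a, c) = (a, c) := by
  simp [pvStepA]

theorem pvMin?_cons (a : Int) (t : List Int) :
    (PySem.List.min? (a :: t) (fun y => y)).getD 0 = t.foldl min a := by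
  rw [PySem.List.min?_id_cons]
  rfl

-- ===== VERDICT (by name: the statement is the Claim_ definition above) =====
theorem get_first_note_occurance_spec : Claim_equal_get_first_note_occurance := by
  intro ps bs _ hpre
  obtain ⟨hps, hbs, _⟩ := hpre
  obtain ⟨a, ps', rfl⟩ := List.exists_cons_of_ne_nil hps
  obtain ⟨c, bs', rfl⟩ := List.exists_cons_of_ne_nil hbs
  unfold Spec_get_first_note_occurance get_first_note_occurance get_first_note_occurance_alt
  simp only [List.zip_cons_cons, PySem.List.pyGet?_zero_cons, Option.getD_some, List.map_cons,
    List.foldl_cons, pvMin?_cons, pvFirstStep]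
  rw [pvMain (ps'.zip bs') a c]
  set M := (((ps'.zip bs').map Prod.fst).foldl min a) with hM
  have hsome : (((a, c) :: ps'.zip bs').foldl (pvStepB M) none).isSome :=
    pvSel_isSome M _ none (Or.inr (pvMin_pair_attained (ps'.zip bs') a c))
  refine Prod.ext_iff.mpr ⟨rfl, ?_⟩
  simp only [List.foldl_cons] at hsome ⊢
  exact congrArg (fun x => [x]) (pvGetD_of_isSome _ hsome c [])
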